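-- pv_equiv track=rewrite | github.com/kartik-01/smart-inventory-recommender | src/assoc_rules.py | filter_top_items
-- ===== SOURCE A (Python) =====
-- from collections import Counter
--
-- def filter_top_items(transactions, top_n=500):
--     """
--     Reduce transactions to only the top_n most frequent items to limit dimensionality.
--     """
--     item_counts = Counter(item for basket in transactions for item in basket)
--     top_items = set([item for item, _ in item_counts.most_common(top_n)])
--     filtered = []
--     for basket in transactions:
--         fb = [item for item in basket if item in top_items]
--         if len(fb) >= 2:
--             filtered.append(fb)
--     return filtered, top_items
-- ===== SOURCE B (Python) =====
-- def filter_top_items(transactions, top_n=500):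
--     """
--     Reduce transactions to only the top_n most frequent items to limit dimensionality.
--     Bucket-by-frequency selection instead of sorting/heap-selecting the whole item list.
--     """
--     counts = {}
--     for basket in transactions:
--         for item in basket:
--             counts[item] = counts.get(item, 0) + 1
--     buckets = {}
--     for item, c in counts.items():
--         buckets.setdefault(c, []).append(item)
--     top_items = set()
--     remaining = top_n
--     for c in sorted(buckets, reverse=True):
--         if remaining <= 0:
--             break
--         bucket = buckets[c]
--         top_items.update(bucket[:remaining])
--         remaining -= len(bucket)
--     filtered = []
--     for basket in transactions:
--         fb = [item for item in basket if item in top_items]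
--         if len(fb) >= 2:
--             filtered.append(fb)
--     return filtered, top_items
-- ===== Notes on version B (the rewrite author's own statement) =====
-- stated objective: alternative
-- what changed: Replaces Counter.most_common's heap-based top-n selection by bucketing items by frequency and walking the distinct frequencies in descending order, taking whole buckets until top_n items are collected; the counting and filtering passes keep their roles but counting uses a plain dict and selection sorts only the distinct counts.
import Mathlib
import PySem

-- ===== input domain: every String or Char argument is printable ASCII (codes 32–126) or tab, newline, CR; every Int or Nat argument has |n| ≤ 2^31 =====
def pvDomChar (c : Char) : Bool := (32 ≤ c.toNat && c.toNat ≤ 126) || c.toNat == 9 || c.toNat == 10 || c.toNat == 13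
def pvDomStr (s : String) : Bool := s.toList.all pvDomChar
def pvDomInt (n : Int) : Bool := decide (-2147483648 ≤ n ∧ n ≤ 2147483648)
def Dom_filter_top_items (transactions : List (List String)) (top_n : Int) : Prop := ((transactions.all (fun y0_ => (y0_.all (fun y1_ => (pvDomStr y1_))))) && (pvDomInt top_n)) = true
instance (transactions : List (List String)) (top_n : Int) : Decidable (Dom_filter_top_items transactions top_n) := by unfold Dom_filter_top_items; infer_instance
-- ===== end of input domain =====

-- B replaces Counter.most_common's heap selection by bucketing items by frequency and walking
-- the distinct frequencies in descending order (objective: alternative algorithm, same filtering pass).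

-- ===== PORT A =====
def filter_top_items (transactions : List (List String)) (top_n : Int) : List (List String) × List String :=
  let item_counts := PySem.Dict.counter (transactions.flatMap (fun basket => basket))
  -- most_common(top_n): the counter's items sorted by count descending (stable sort,
  -- documented contract of heapq.nlargest), first top_n of them ([] for top_n ≤ 0)
  let top_items : PySem.Set String :=
    PySem.Set.ofList
      (((PySem.List.sorted item_counts.items (fun p => p.2) true).take top_n.toNat).map (fun p => p.1))
  let filtered := transactions.foldl (fun (acc : List (List String)) basket =>
    let fb : List String := basket.filter (fun item => top_items.contains item)
    if 2 ≤ fb.length then acc ++ [fb] else acc) []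
  (filtered, top_items)

-- ===== PORT B =====
def filter_top_items_alt (transactions : List (List String)) (top_n : Int) : List (List String) × List String :=
  let counts : PySem.Dict String Int :=
    transactions.foldl (fun d basket =>
      basket.foldl (fun d item => d.insert item (d.getD item 0 + 1)) d) PySem.Dict.empty
  let buckets : PySem.Dict Int (List String) :=
    counts.items.foldl (fun d p => d.modify p.2 [] (fun b => b ++ [p.1])) PySem.Dict.empty
  -- 'for c in sorted(buckets, reverse=True)' with 'if remaining <= 0: break';
  -- the break is modeled by skipping once st.2 ≤ 0 (the state never changes afterwards)
  let sel := (PySem.List.sorted buckets.keys (fun c => c) true).foldl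
    (fun (st : PySem.Set String × Int) c =>
      if st.2 ≤ 0 then st
      else
        let bucket := buckets.getD c []
        (PySem.Set.update st.1 (bucket.take st.2.toNat), st.2 - bucket.length))
    (PySem.Set.empty, top_n)
  let top_items := sel.1
  let filtered := transactions.foldl (fun (acc : List (List String)) basket =>
    let fb : List String := basket.filter (fun item => top_items.contains item)
    if 2 ≤ fb.length then acc ++ [fb] else acc) []
  (filtered, top_items)

-- ===== PRECONDITION & SPEC =====
def Spec_filter_top_items (transactions : List (List String)) (top_n : Int) (out : List (List String) × List String) : Prop := out = filter_top_items_alt transactions top_n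
instance (transactions : List (List String)) (top_n : Int) (out : List (List String) × List String) : Decidable (Spec_filter_top_items transactions top_n out) := by unfold Spec_filter_top_items; infer_instance

-- ===== CLAIM (what is proved, stated in full; the proofs are below) =====
def Claim_equal_filter_top_items : Prop := ∀ (transactions : List (List String)) (top_n : Int), Dom_filter_top_items transactions top_n → Spec_filter_top_items transactions top_n (filter_top_items transactions top_n)

-- ===== LEMMAS AND PROOFS =====

lemma insertBy_append_not_before {α : Type} (before : α → α → Bool) (x : α)
    (as bs : List α) (h : ∀ a ∈ as, before x a = false) :
    PySem.List.insertBy before x (as ++ bs) = as ++ PySem.List.insertBy before x bs := by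
  induction as with
  | nil => simp
  | cons a as ih =>
    have ha := h a (by simp)
    simp only [List.cons_append, PySem.List.insertBy, ha]
    simp only [Bool.false_eq_true, if_false]
    rw [ih (fun a ha' => h a (by simp [ha']))]
lemma insertBy_all_before {α : Type} (before : α → α → Bool) (x : α)
    (l : List α) (h : ∀ a ∈ l, before x a = true) :
    PySem.List.insertBy before x l = x :: l := by
  cases l with
  | nil => rfl
  | cons a l => simp [PySem.List.insertBy, h a (by simp)]

lemma flatMap_bucket_id {α : Type} (k : α → Int) (x : α) (cs : List Int) (f : Int → List α)
    (hne : ∀ c ∈ cs, c ≠ k x) :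
    cs.flatMap (fun c => f c ++ if c == k x then [x] else []) = cs.flatMap f := by
  refine List.flatMap_congr (fun c hc => ?_)
  simp [hne c hc]

lemma insertBy_flatMap_mem {α : Type} (key : α → Int) (x : α) (cs : List Int) (f : Int → List α)
    (hks : ∀ c ∈ cs, ∀ y ∈ f c, key y = c) (hdesc : cs.Pairwise (· > ·)) (hmem : key x ∈ cs) :
    PySem.List.insertBy (fun a b => decide (key b < key a)) x (cs.flatMap f) =
      cs.flatMap (fun c => f c ++ if c == key x then [x] else []) := by
  induction cs with
  | nil => simp at hmem
  | cons c cs ih =>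
    obtain ⟨hgt, hdesc'⟩ := List.pairwise_cons.mp hdesc
    by_cases hc : c = key x
    · subst hc
      rw [List.flatMap_cons,
        insertBy_append_not_before _ _ _ _ (fun y hy => by
          have := hks (key x) (by simp) y hy; simp [this]),
        insertBy_all_before _ _ _ (fun y hy => by
          obtain ⟨c', hc', hy'⟩ := List.mem_flatMap.mp hy
          have hk := hks c' (by simp [hc']) y hy'
          simp [hk, hgt c' hc']),
        List.flatMap_cons,
        flatMap_bucket_id key x cs f (fun c' hc' => ne_of_lt (hgt c' hc'))]
      simp
    · have hxcs : key x ∈ cs := by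
        rcases List.mem_cons.mp hmem with h | h
        · exact absurd h.symm hc
        · exact h
      have hclt : key x < c := hgt _ hxcs
      rw [List.flatMap_cons,
        insertBy_append_not_before _ _ _ _ (fun y hy => by
          have := hks c (by simp) y hy
          simp [this, not_lt.mpr (le_of_lt hclt)]),
        ih (fun c' h' y hy => hks c' (by simp [h']) y hy) hdesc' hxcs,
        List.flatMap_cons]
      have : (c == key x) = false := by simp [hc]
      simp [this]

lemma insertBy_flatMap_new {α : Type} (key : α → Int) (x : α) (cs : List Int) (f : Int → List α)
    (hks : ∀ c ∈ cs, ∀ y ∈ f c, key y = c) (hdesc : cs.Pairwise (· > ·))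
    (hmem : key x ∉ cs) (hempty : f (key x) = []) :
    PySem.List.insertBy (fun a b => decide (key b < key a)) x (cs.flatMap f) =
      (PySem.List.insertBy (fun a b => decide (b < a)) (key x) cs).flatMap
        (fun c => f c ++ if c == key x then [x] else []) := by
  induction cs with
  | nil => simp [PySem.List.insertBy, hempty]
  | cons c cs ih =>
    obtain ⟨hgt, hdesc'⟩ := List.pairwise_cons.mp hdesc
    have hc : c ≠ key x := fun h => hmem (by simp [h])
    rcases lt_or_gt_of_ne hc with hlt | hgt2
    · -- c < key x : x goes in front
      rw [insertBy_all_before _ _ _ (fun y hy => by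
        obtain ⟨c', hc', hy'⟩ := List.mem_flatMap.mp hy
        have hk := hks c' hc' y hy'
        rcases List.mem_cons.mp hc' with h | h
        · simp [hk, h, hlt]
        · have := hgt _ h
          simp [hk]; omega)]
      have hbefore : PySem.List.insertBy (fun a b => decide (b < a)) (key x) (c :: cs) =
          key x :: c :: cs := by
        simp [PySem.List.insertBy, hlt]
      have hg : List.flatMap (fun c => f c ++ if c == key x then [x] else [])
          (key x :: c :: cs) = x :: List.flatMap f (c :: cs) := by
        rw [List.flatMap_cons, hempty,
          flatMap_bucket_id key x (c :: cs) f (fun c' hc' => by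
            rcases List.mem_cons.mp hc' with h | h
            · exact h ▸ hc
            · exact ne_of_lt (lt_trans (hgt _ h) hlt))]
        simp
      rw [hbefore, hg]
    · -- c > key x : skip bucket c and recurse
      have hxcs : key x ∉ cs := fun h => hmem (by simp [h])
      rw [List.flatMap_cons,
        insertBy_append_not_before _ _ _ _ (fun y hy => by
          have := hks c (by simp) y hy
          simp [this]; omega),
        ih (fun c' h' y hy => hks c' (by simp [h']) y hy) hdesc' hxcs]
      have hbefore : PySem.List.insertBy (fun a b => decide (b < a)) (key x) (c :: cs) =
          c :: PySem.List.insertBy (fun a b => decide (b < a)) (key x) cs := by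
        simp [PySem.List.insertBy]; omega
      rw [hbefore, List.flatMap_cons]
      have : (c == key x) = false := by simp [hc]
      simp [this]

lemma sorted_ofList_pairwise_gt (l : List Int) :
    (PySem.List.sorted (PySem.Set.ofList l) (fun c => c) true).Pairwise (· > ·) := by
  have hge := PySem.List.sorted_pairwise_rev (PySem.Set.ofList l) (fun c : Int => c)
  have hnd : (PySem.List.sorted (PySem.Set.ofList l) (fun c : Int => c) true).Nodup :=
    (PySem.List.sorted_perm (PySem.Set.ofList l) (fun c : Int => c) true).symm.nodup
      (PySem.Set.nodup_ofList l)
  exact (hge.and hnd).imp (fun h => lt_of_le_of_ne h.1 (Ne.symm h.2))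

lemma sorted_rev_buckets {α : Type} (key : α → Int) (l : List α) :
    PySem.List.sorted l key true =
      (PySem.List.sorted (PySem.Set.ofList (l.map key)) (fun c => c) true).flatMap
        (fun c => l.filter (fun x => key x == c)) := by
  induction l using List.reverseRecOn with
  | nil => simp [PySem.List.sorted, PySem.Set.ofList]
  | append_singleton l x ih =>
    have hL : PySem.List.sorted (l ++ [x]) key true =
        PySem.List.insertBy (fun a b => decide (key b < key a)) x (PySem.List.sorted l key true) := by
      rw [PySem.List.sorted_rev_eq_foldl_insertBy, PySem.List.sorted_rev_eq_foldl_insertBy,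
        List.foldl_append]
      simp
    have hdesc := sorted_ofList_pairwise_gt (l.map key)
    have hks : ∀ c ∈ PySem.List.sorted (PySem.Set.ofList (l.map key)) (fun c => c) true,
        ∀ y ∈ l.filter (fun z => key z == c), key y = c := by
      intro c _ y hy; simpa using (List.mem_filter.mp hy).2
    have hbucket : ∀ c : Int,
        (l.filter (fun z => key z == c)) ++ (if c == key x then [x] else []) =
          (l ++ [x]).filter (fun z => key z == c) := by
      intro c
      rw [List.filter_append]
      by_cases h : c = key x
      · subst h; simp
      · have h2 : (key x == c) = false := by simp [Ne.symm h]
        simp [h, h2]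
    by_cases hmem : key x ∈ l.map key
    · have hK' : PySem.Set.ofList ((l ++ [x]).map key) = PySem.Set.ofList (l.map key) := by
        rw [List.map_append, List.map_singleton, PySem.Set.ofList_append_singleton,
          PySem.Set.add_of_mem ((PySem.Set.mem_ofList (l.map key) (key x)).mpr hmem)]
      rw [hL, ih, insertBy_flatMap_mem key x _ _ hks hdesc
        (((PySem.List.sorted_perm _ _ _).mem_iff).mpr ((PySem.Set.mem_ofList (l.map key) (key x)).mpr hmem)),
        hK']
      exact List.flatMap_congr (fun c _ => hbucket c)
    · have hK' : PySem.Set.ofList ((l ++ [x]).map key) = PySem.Set.ofList (l.map key) ++ [key x] := by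
        rw [List.map_append, List.map_singleton, PySem.Set.ofList_append_singleton,
          PySem.Set.add_of_not_mem (fun h => hmem ((PySem.Set.mem_ofList (l.map key) (key x)).mp h))]
      have hS' : PySem.List.sorted (PySem.Set.ofList (l.map key) ++ [key x]) (fun c => c) true =
          PySem.List.insertBy (fun a b => decide (b < a)) (key x)
            (PySem.List.sorted (PySem.Set.ofList (l.map key)) (fun c => c) true) := by
        rw [PySem.List.sorted_rev_eq_foldl_insertBy, PySem.List.sorted_rev_eq_foldl_insertBy,
          List.foldl_append]
        simp
      have hempty : l.filter (fun z => key z == key x) = [] := by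
        refine List.filter_eq_nil_iff.mpr (fun y hy => ?_)
        simp only [beq_iff_eq]
        intro h
        exact hmem (h ▸ List.mem_map_of_mem hy)
      rw [hL, ih, insertBy_flatMap_new key x _ _ hks hdesc
        (fun h => hmem ((PySem.Set.mem_ofList (l.map key) (key x)).mp (((PySem.List.sorted_perm _ _ _).mem_iff).mp h)))
        hempty, hK', hS']
      exact List.flatMap_congr (fun c _ => hbucket c)

lemma sel_fold_fst (ls : List (List String)) : ∀ (s : PySem.Set String) (r : Int),
    (ls.foldl (fun (st : PySem.Set String × Int) bucket =>
        if st.2 ≤ 0 then st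
        else (PySem.Set.update st.1 (bucket.take st.2.toNat), st.2 - bucket.length)) (s, r)).1
      = PySem.Set.update s (ls.flatten.take r.toNat) := by
  induction ls with
  | nil => intro s r; simp [PySem.Set.update]
  | cons b ls ih =>
    intro s r
    by_cases hr : r ≤ 0
    · have h0 : r.toNat = 0 := by omega
      simp only [List.foldl_cons, if_pos hr, ih, h0, List.take_zero, List.flatten_cons]
    · have ht : (r - (b.length : Int)).toNat = r.toNat - b.length := by omega
      simp only [List.foldl_cons, if_neg hr, ih, List.flatten_cons, ht]
      rw [List.take_append, PySem.Set.update_append]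

lemma sel_fold_getD (cs : List Int) (B : Int → List String) (s : PySem.Set String) (r : Int) :
    (cs.foldl (fun (st : PySem.Set String × Int) c =>
        if st.2 ≤ 0 then st
        else (PySem.Set.update st.1 (List.take st.2.toNat (B c)), st.2 - ↑(B c).length)) (s, r)).1
      = PySem.Set.update s (((cs.map B).flatten).take r.toNat) := by
  have h := List.foldl_map (f := B)
    (g := fun (st : PySem.Set String × Int) bucket =>
      if st.2 ≤ 0 then st
      else (PySem.Set.update st.1 (bucket.take st.2.toNat), st.2 - bucket.length))
    (l := cs) (init := (s, r))
  exact (congrArg Prod.fst h.symm).trans (sel_fold_fst (cs.map B) s r)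

lemma top_select_eq (items : List (String × Int)) (n : Int) :
    (List.foldl (fun (st : PySem.Set String × Int) c =>
        if st.2 ≤ 0 then st
        else (PySem.Set.update st.1 (List.take st.2.toNat
                ((items.foldl (fun d p => d.modify p.2 [] (fun b => b ++ [p.1])) PySem.Dict.empty).getD c [])),
              st.2 - ↑((items.foldl (fun d p => d.modify p.2 [] (fun b => b ++ [p.1])) PySem.Dict.empty).getD c []).length))
      (PySem.Set.empty, n)
      (PySem.List.sorted (items.foldl (fun d p => d.modify p.2 [] (fun b => b ++ [p.1])) PySem.Dict.empty).keys (fun c => c) true)).1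
    = PySem.Set.ofList (List.map (fun p => p.1) (List.take n.toNat (PySem.List.sorted items (fun p => p.2) true))) := by
  set buckets := items.foldl (fun d p => d.modify p.2 [] (fun b => b ++ [p.1])) PySem.Dict.empty with hb
  have hkeys : buckets.keys = PySem.Set.ofList (items.map (fun p => p.2)) := by
    rw [hb, PySem.Dict.keys_foldl_modify_key items (fun p => p.2) [] (fun d p => (fun b => b ++ [p.1])) PySem.Dict.empty]
    simp [PySem.Set.update_nil_left]
  have hgetD : ∀ c : Int, buckets.getD c [] = (items.filter (fun p => p.2 == c)).map (fun p => p.1) := by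
    intro c
    have hswap : buckets = (items.map (fun p => (p.2, p.1))).foldl
        (fun d q => d.modify q.1 [] (fun b => b ++ [q.2])) PySem.Dict.empty := by
      rw [List.foldl_map]
    rw [hswap, PySem.Dict.getD_foldl_modify_append]
    simp [List.filter_map, Function.comp_def, List.map_map]
  rw [sel_fold_getD]
  have hflat : (List.map (fun c => buckets.getD c [])
        (PySem.List.sorted buckets.keys (fun c => c) true)).flatten
      = List.map (fun p => p.1) (PySem.List.sorted items (fun p => p.2) true) := by
    rw [List.map_eq_map_iff.mpr (fun c _ => hgetD c), hkeys,
      sorted_rev_buckets (fun p => p.2) items, List.map_flatMap, List.flatMap_def]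
  rw [hflat, ← List.map_take]
  show PySem.Set.update [] _ = _
  rw [PySem.Set.update_nil_left]

-- ===== VERDICT (by name: the statement is the Claim_ definition above) =====
theorem filter_top_items_spec : Claim_equal_filter_top_items := by
  intro transactions top_n _
  unfold Spec_filter_top_items filter_top_items filter_top_items_alt
  dsimp only
  have hcounts : (List.foldl (fun d basket =>
      List.foldl (fun d item => d.insert item (d.getD item 0 + 1)) d basket)
      PySem.Dict.empty transactions)
      = PySem.Dict.counter (transactions.flatMap (fun basket => basket)) := by
    rw [← PySem.Dict.foldl_insert_getD_add_one_eq_counter]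
    exact (List.foldl_flatMap).symm
  rw [hcounts, top_select_eq]
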